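-- pv_equiv track=rewrite | github.com/lingk7/KabeNaki | Source/Tkinter/tkinter_app.py | categorize_part
-- ===== SOURCE A (Python) =====
-- def categorize_part(part_name):
--     name_lower = part_name.lower()
--
--     if any(word in name_lower for word in ['body', 'torso']):
--         return 'body'
--     elif any(word in name_lower for word in ['head', 'face']):
--         return 'head'
--     elif 'arml' in name_lower or 'leftarm' in name_lower:
--         return 'arm_left'
--     elif 'armr' in name_lower or 'rightarm' in name_lower:
--         return 'arm_right'
--     elif 'arm' in name_lower:
--         return 'arms'
--     elif 'eye' in name_lower:
--         return 'eyes'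
--     elif 'mouth' in name_lower:
--         return 'mouth'
--     elif 'hair' in name_lower:
--         return 'hair'
--     elif any(word in name_lower for word in ['blend', 'effect', 'shadow']):
--         return 'effects'
--     else:
--         return 'other'
-- ===== SOURCE B (Python) =====
-- KEYWORDS = [
--     ('body', 0), ('torso', 0),
--     ('head', 1), ('face', 1),
--     ('arml', 2), ('leftarm', 2),
--     ('armr', 3), ('rightarm', 3),
--     ('arm', 4),
--     ('eye', 5),
--     ('mouth', 6),
--     ('hair', 7),
--     ('blend', 8), ('effect', 8), ('shadow', 8),
-- ]
-- CATS = ['body', 'head', 'arm_left', 'arm_right', 'arms', 'eyes', 'mouth', 'hair', 'effects']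
--
-- def categorize_part(part_name):
--     # Single left-to-right scan: at each position try every keyword as a prefix,
--     # keeping the smallest (highest-precedence) rule index seen.
--     s = part_name.lower()
--     best = len(CATS)
--     for i in range(len(s)):
--         for kw, r in KEYWORDS:
--             if r < best and s.startswith(kw, i):
--                 best = r
--     return CATS[best] if best < len(CATS) else 'other'
-- ===== Notes on version B (the rewrite author's own statement) =====
-- stated objective: alternative
-- what changed: Replaced the ordered if/elif chain of substring-membership tests by a single left-to-right scan of the string that tries every keyword as a prefix at each position and keeps the smallest (highest-precedence) rule index, returning the category for that index.
import Mathlib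
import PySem

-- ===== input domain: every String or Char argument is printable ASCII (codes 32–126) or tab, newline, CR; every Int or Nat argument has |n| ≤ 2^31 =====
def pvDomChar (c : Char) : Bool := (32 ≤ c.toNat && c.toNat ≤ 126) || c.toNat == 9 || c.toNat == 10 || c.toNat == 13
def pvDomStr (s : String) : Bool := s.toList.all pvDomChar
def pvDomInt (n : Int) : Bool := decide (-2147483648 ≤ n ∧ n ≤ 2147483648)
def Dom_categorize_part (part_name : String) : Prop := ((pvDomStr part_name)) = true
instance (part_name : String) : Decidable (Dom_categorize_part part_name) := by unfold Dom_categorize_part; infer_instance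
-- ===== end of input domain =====

-- B replaces the nine ordered substring-membership branches by a single left-to-right
-- scan over the string that tries every keyword as a prefix at each position and keeps
-- the smallest rule index (alternative algorithm; same precedence, same asymptotic cost).


-- ===== PORT A =====
def categorize_part (part_name : String) : String :=
  let name_lower := PySem.Str.lower part_name
  if ["body", "torso"].any (fun word => PySem.Str.isIn word name_lower) then "body"
  else if ["head", "face"].any (fun word => PySem.Str.isIn word name_lower) then "head"
  else if PySem.Str.isIn "arml" name_lower || PySem.Str.isIn "leftarm" name_lower then "arm_left"
  else if PySem.Str.isIn "armr" name_lower || PySem.Str.isIn "rightarm" name_lower then "arm_right"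
  else if PySem.Str.isIn "arm" name_lower then "arms"
  else if PySem.Str.isIn "eye" name_lower then "eyes"
  else if PySem.Str.isIn "mouth" name_lower then "mouth"
  else if PySem.Str.isIn "hair" name_lower then "hair"
  else if ["blend", "effect", "shadow"].any (fun word => PySem.Str.isIn word name_lower) then "effects"
  else "other"

-- ===== PORT B =====
-- KEYWORDS: (keyword, rule index), exactly as in Source B
def pvKeywords : List (List Char × Nat) :=
  [("body".toList, 0), ("torso".toList, 0),
   ("head".toList, 1), ("face".toList, 1),
   ("arml".toList, 2), ("leftarm".toList, 2),
   ("armr".toList, 3), ("rightarm".toList, 3),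
   ("arm".toList, 4),
   ("eye".toList, 5),
   ("mouth".toList, 6),
   ("hair".toList, 7),
   ("blend".toList, 8), ("effect".toList, 8), ("shadow".toList, 8)]

def pvCats : List String :=
  ["body", "head", "arm_left", "arm_right", "arms", "eyes", "mouth", "hair", "effects"]

-- inner loop of Source B: 'for kw, r in KEYWORDS: if r < best and s.startswith(kw, i): best = r'
-- (Python s.startswith(kw, i) with 0 ≤ i ≤ len(s) is exactly kw.isPrefixOf (s.drop i) — exact here)
def pvInner (s : List Char) (i : Nat) (best : Nat) : Nat :=
  pvKeywords.foldl (fun b kr => if kr.2 < b ∧ kr.1.isPrefixOf (s.drop i) then kr.2 else b) best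

-- outer loop of Source B: 'for i in range(len(s)): …' starting from best = len(CATS)
def pvBest (s : List Char) : Nat :=
  (List.range s.length).foldl (fun b i => pvInner s i b) pvCats.length

def categorize_part_alt (part_name : String) : String :=
  let s := (PySem.Str.lower part_name).toList
  let best := pvBest s
  if best < pvCats.length then pvCats.getD best "other" else "other"

-- ===== PRECONDITION & SPEC =====
def Spec_categorize_part (part_name : String) (out : String) : Prop := out = categorize_part_alt part_name
instance (part_name : String) (out : String) : Decidable (Spec_categorize_part part_name out) := by unfold Spec_categorize_part; infer_instance

-- ===== CLAIM (what is proved, stated in full; the proofs are below) =====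
def Claim_equal_categorize_part : Prop := ∀ (part_name : String), Dom_categorize_part part_name → Spec_categorize_part part_name (categorize_part part_name)

-- ===== LEMMAS AND PROOFS =====

-- a fold whose step never increases the accumulator stays ≤ the initial value
theorem pv_foldl_le {α : Type} (f : Nat → α → Nat) (hf : ∀ b x, f b x ≤ b) :
    ∀ (l : List α) (b : Nat), List.foldl f b l ≤ b := by
  intro l
  induction l with
  | nil => intro b; simp
  | cons x l ih => intro b; exact le_trans (ih (f b x)) (hf b x)

theorem pv_step_le (s : List Char) (i : Nat) (b : Nat) (kr : List Char × Nat) :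
    (if kr.2 < b ∧ kr.1.isPrefixOf (s.drop i) then kr.2 else b) ≤ b := by
  split_ifs with h
  · exact le_of_lt h.1
  · exact le_refl b

theorem pvInner_le (s : List Char) (i b : Nat) : pvInner s i b ≤ b :=
  pv_foldl_le _ (fun b kr => pv_step_le s i b kr) pvKeywords b

theorem pvInner_aux_le (s : List Char) (i : Nat) :
    ∀ (l : List (List Char × Nat)) (b : Nat) (kr : List Char × Nat), kr ∈ l →
      kr.1.isPrefixOf (s.drop i) = true →
      List.foldl (fun b kr => if kr.2 < b ∧ kr.1.isPrefixOf (s.drop i) then kr.2 else b) b l ≤ kr.2 := by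
  intro l
  induction l with
  | nil => intro b kr h; simp at h
  | cons x l ih =>
    intro b kr hmem hp
    rcases List.mem_cons.mp hmem with h | h
    · subst h
      rw [List.foldl_cons]
      refine le_trans (pv_foldl_le _ (fun b y => pv_step_le s i b y) l _) ?_
      by_cases hb : kr.2 < b
      · rw [if_pos ⟨hb, hp⟩]
      · rw [if_neg (fun hc => hb hc.1)]; omega
    · rw [List.foldl_cons]; exact ih _ kr h hp

theorem pvInner_le_of (s : List Char) (i b : Nat) (kr : List Char × Nat)
    (hmem : kr ∈ pvKeywords) (hp : kr.1.isPrefixOf (s.drop i) = true) :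
    pvInner s i b ≤ kr.2 :=
  pvInner_aux_le s i pvKeywords b kr hmem hp

theorem pvInner_aux_mem (s : List Char) (i : Nat) :
    ∀ (l : List (List Char × Nat)) (b : Nat),
      List.foldl (fun b kr => if kr.2 < b ∧ kr.1.isPrefixOf (s.drop i) then kr.2 else b) b l = b ∨
      ∃ kr ∈ l, kr.1.isPrefixOf (s.drop i) = true ∧
        List.foldl (fun b kr => if kr.2 < b ∧ kr.1.isPrefixOf (s.drop i) then kr.2 else b) b l = kr.2 := by
  intro l
  induction l with
  | nil => intro b; left; rfl
  | cons x l ih =>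
    intro b
    rw [List.foldl_cons]
    rcases ih (if x.2 < b ∧ x.1.isPrefixOf (s.drop i) then x.2 else b) with h | ⟨kr, hm, hp, he⟩
    · by_cases hx : x.2 < b ∧ x.1.isPrefixOf (s.drop i) = true
      · right; refine ⟨x, List.mem_cons_self .., hx.2, ?_⟩; rw [h, if_pos hx]
      · left; rw [h, if_neg hx]
    · right; exact ⟨kr, List.mem_cons_of_mem _ hm, hp, he⟩

theorem pvInner_mem (s : List Char) (i b : Nat) :
    pvInner s i b = b ∨ ∃ kr ∈ pvKeywords, kr.1.isPrefixOf (s.drop i) = true ∧ pvInner s i b = kr.2 :=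
  pvInner_aux_mem s i pvKeywords b

theorem pvOuter_mem (s : List Char) :
    ∀ (l : List Nat) (b : Nat),
      List.foldl (fun b i => pvInner s i b) b l = b ∨
      ∃ i ∈ l, ∃ kr ∈ pvKeywords, kr.1.isPrefixOf (s.drop i) = true ∧
        List.foldl (fun b i => pvInner s i b) b l = kr.2 := by
  intro l
  induction l with
  | nil => intro b; left; rfl
  | cons x l ih =>
    intro b
    rw [List.foldl_cons]
    rcases ih (pvInner s x b) with h | ⟨i, hi, kr, hm, hp, he⟩
    · rcases pvInner_mem s x b with h2 | ⟨kr, hm, hp, he⟩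
      · left; rw [h, h2]
      · right; exact ⟨x, List.mem_cons_self .., kr, hm, hp, by rw [h, he]⟩
    · right; exact ⟨i, List.mem_cons_of_mem _ hi, kr, hm, hp, he⟩

theorem pvOuter_le_of (s : List Char) :
    ∀ (l : List Nat) (b : Nat) (i : Nat), i ∈ l →
      ∀ (kr : List Char × Nat), kr ∈ pvKeywords → kr.1.isPrefixOf (s.drop i) = true →
      List.foldl (fun b i => pvInner s i b) b l ≤ kr.2 := by
  intro l
  induction l with
  | nil => intro b i h; simp at h
  | cons x l ih =>
    intro b i hmem kr hk hp
    rcases List.mem_cons.mp hmem with h | h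
    · subst h
      rw [List.foldl_cons]
      exact le_trans (pv_foldl_le _ (fun b j => pvInner_le s j b) l (pvInner s i b))
        (pvInner_le_of s i b kr hk hp)
    · rw [List.foldl_cons]; exact ih _ i h kr hk hp

theorem pvBest_le_of (s : List Char) (kr : List Char × Nat) (hk : kr ∈ pvKeywords)
    (h : ∃ i < s.length, kr.1.isPrefixOf (s.drop i) = true) : pvBest s ≤ kr.2 := by
  rcases h with ⟨i, hi, hp⟩
  exact pvOuter_le_of s (List.range s.length) pvCats.length i (List.mem_range.mpr hi) kr hk hp

theorem pvBest_cases (s : List Char) :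
    pvBest s = 9 ∨ ∃ kr ∈ pvKeywords, (∃ i < s.length, kr.1.isPrefixOf (s.drop i) = true) ∧ pvBest s = kr.2 := by
  rcases pvOuter_mem s (List.range s.length) pvCats.length with h | ⟨i, hi, kr, hm, hp, he⟩
  · left; exact h
  · right; exact ⟨kr, hm, ⟨i, List.mem_range.mp hi, hp⟩, he⟩

-- every keyword is nonempty
theorem pvKeywords_ne_nil : ∀ kr ∈ pvKeywords, kr.1 ≠ [] := by decide

-- occurrence-at-some-position versus Python's 'kw in s', for nonempty kw
theorem pv_matchAt_iff (kw L : List Char) (hkw : kw ≠ []) :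
    (∃ i < L.length, kw.isPrefixOf (L.drop i) = true) ↔ PySem.Chars.isIn kw L = true := by
  rw [← PySem.Chars.exists_prefix_drop_iff_isIn]
  constructor
  · rintro ⟨i, _, hp⟩; exact ⟨i, List.isPrefixOf_iff_prefix.mp hp⟩
  · rintro ⟨j, hp⟩
    by_cases hj : j < L.length
    · exact ⟨j, hj, List.isPrefixOf_iff_prefix.mpr hp⟩
    · exfalso
      have hd : L.drop j = [] := List.drop_eq_nil_of_le (by omega)
      rw [hd, List.prefix_nil] at hp
      exact hkw hp

-- master lemma: if the rule-r condition bounds pvBest and no lower-index keyword occurs, pvBest = r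
theorem pvBest_eq (L : List Char) (r : Nat) (hr9 : r < 9) (hub : pvBest L ≤ r)
    (hlow : ∀ kr ∈ pvKeywords, kr.2 < r → PySem.Chars.isIn kr.1 L = false) :
    pvBest L = r := by
  rcases pvBest_cases L with h | ⟨kr, hm, hmatch, he⟩
  · omega
  · have hin : PySem.Chars.isIn kr.1 L = true :=
      (pv_matchAt_iff kr.1 L (pvKeywords_ne_nil kr hm)).mp hmatch
    by_cases hlt : kr.2 < r
    · rw [hlow kr hm hlt] at hin; exact absurd hin (by simp)
    · omega

theorem pvBest_eq_nine (L : List Char)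
    (hnone : ∀ kr ∈ pvKeywords, PySem.Chars.isIn kr.1 L = false) : pvBest L = 9 := by
  rcases pvBest_cases L with h | ⟨kr, hm, hmatch, he⟩
  · exact h
  · have hin := (pv_matchAt_iff kr.1 L (pvKeywords_ne_nil kr hm)).mp hmatch
    rw [hnone kr hm] at hin; exact absurd hin (by simp)

-- shorthand: pvBest ≤ r from 'kw in s' for a concrete table entry
theorem pvBest_le_of_isIn (L : List Char) (kr : List Char × Nat) (hk : kr ∈ pvKeywords)
    (h : PySem.Chars.isIn kr.1 L = true) : pvBest L ≤ kr.2 :=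
  pvBest_le_of L kr hk ((pv_matchAt_iff kr.1 L (pvKeywords_ne_nil kr hk)).mpr h)

-- ===== VERDICT (by name: the statement is the Claim_ definition above) =====
-- the fifteen table entries, spelled out once (used by every branch of the final proof)
theorem pvKeywords_cases (kr : List Char × Nat) (hm : kr ∈ pvKeywords) :
    kr = ("body".toList, 0) ∨
    kr = ("torso".toList, 0) ∨
    kr = ("head".toList, 1) ∨
    kr = ("face".toList, 1) ∨
    kr = ("arml".toList, 2) ∨
    kr = ("leftarm".toList, 2) ∨
    kr = ("armr".toList, 3) ∨
    kr = ("rightarm".toList, 3) ∨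
    kr = ("arm".toList, 4) ∨
    kr = ("eye".toList, 5) ∨
    kr = ("mouth".toList, 6) ∨
    kr = ("hair".toList, 7) ∨
    kr = ("blend".toList, 8) ∨
    kr = ("effect".toList, 8) ∨
    kr = ("shadow".toList, 8) := by
  simpa only [pvKeywords, List.mem_cons, List.not_mem_nil, or_false] using hm

-- ===== VERDICT (by name: the statement is the Claim_ definition above) =====
set_option maxHeartbeats 1600000 in
theorem categorize_part_spec : Claim_equal_categorize_part := by
  intro pn _
  unfold Spec_categorize_part categorize_part categorize_part_alt
  set L := (PySem.Str.lower pn).toList with hL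
  simp only [List.any_cons, List.any_nil, Bool.or_false, PySem.Str.isIn_eq, ← hL]
  by_cases h1 : (PySem.Chars.isIn "body".toList L || PySem.Chars.isIn "torso".toList L) = true
  · have hb : pvBest L = 0 := by
      apply pvBest_eq L 0 (by decide)
      · rcases (Bool.or_eq_true _ _) ▸ h1 with h | h
        · exact pvBest_le_of_isIn L ("body".toList, 0) (by exact .head _) h
        · exact pvBest_le_of_isIn L ("torso".toList, 0) (by exact .tail _ (.head _)) h
      · intro kr hm hlt
        exact absurd hlt (Nat.not_lt_zero _)
    rw [if_pos h1, hb]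
    decide
  rw [if_neg h1]
  simp only [Bool.or_eq_true, not_or, Bool.not_eq_true] at h1
  by_cases h2 : (PySem.Chars.isIn "head".toList L || PySem.Chars.isIn "face".toList L) = true
  · have hb : pvBest L = 1 := by
      apply pvBest_eq L 1 (by decide)
      · rcases (Bool.or_eq_true _ _) ▸ h2 with h | h
        · exact pvBest_le_of_isIn L ("head".toList, 1) (by exact .tail _ (.tail _ (.head _))) h
        · exact pvBest_le_of_isIn L ("face".toList, 1) (by exact .tail _ (.tail _ (.tail _ (.head _)))) h
      · intro kr hm hlt
        rcases pvKeywords_cases kr hm with rfl|rfl|rfl|rfl|rfl|rfl|rfl|rfl|rfl|rfl|rfl|rfl|rfl|rfl|rfl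
        · exact h1.1
        · exact h1.2
        · exact absurd hlt (by decide)
        · exact absurd hlt (by decide)
        · exact absurd hlt (by decide)
        · exact absurd hlt (by decide)
        · exact absurd hlt (by decide)
        · exact absurd hlt (by decide)
        · exact absurd hlt (by decide)
        · exact absurd hlt (by decide)
        · exact absurd hlt (by decide)
        · exact absurd hlt (by decide)
        · exact absurd hlt (by decide)
        · exact absurd hlt (by decide)
        · exact absurd hlt (by decide)
    rw [if_pos h2, hb]
    decide
  rw [if_neg h2]
  simp only [Bool.or_eq_true, not_or, Bool.not_eq_true] at h2
  by_cases h3 : (PySem.Chars.isIn "arml".toList L || PySem.Chars.isIn "leftarm".toList L) = true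
  · have hb : pvBest L = 2 := by
      apply pvBest_eq L 2 (by decide)
      · rcases (Bool.or_eq_true _ _) ▸ h3 with h | h
        · exact pvBest_le_of_isIn L ("arml".toList, 2) (by exact .tail _ (.tail _ (.tail _ (.tail _ (.head _))))) h
        · exact pvBest_le_of_isIn L ("leftarm".toList, 2) (by exact .tail _ (.tail _ (.tail _ (.tail _ (.tail _ (.head _)))))) h
      · intro kr hm hlt
        rcases pvKeywords_cases kr hm with rfl|rfl|rfl|rfl|rfl|rfl|rfl|rfl|rfl|rfl|rfl|rfl|rfl|rfl|rfl
        · exact h1.1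
        · exact h1.2
        · exact h2.1
        · exact h2.2
        · exact absurd hlt (by decide)
        · exact absurd hlt (by decide)
        · exact absurd hlt (by decide)
        · exact absurd hlt (by decide)
        · exact absurd hlt (by decide)
        · exact absurd hlt (by decide)
        · exact absurd hlt (by decide)
        · exact absurd hlt (by decide)
        · exact absurd hlt (by decide)
        · exact absurd hlt (by decide)
        · exact absurd hlt (by decide)
    rw [if_pos h3, hb]
    decide
  rw [if_neg h3]
  simp only [Bool.or_eq_true, not_or, Bool.not_eq_true] at h3
  by_cases h4 : (PySem.Chars.isIn "armr".toList L || PySem.Chars.isIn "rightarm".toList L) = true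
  · have hb : pvBest L = 3 := by
      apply pvBest_eq L 3 (by decide)
      · rcases (Bool.or_eq_true _ _) ▸ h4 with h | h
        · exact pvBest_le_of_isIn L ("armr".toList, 3) (by exact .tail _ (.tail _ (.tail _ (.tail _ (.tail _ (.tail _ (.head _))))))) h
        · exact pvBest_le_of_isIn L ("rightarm".toList, 3) (by exact .tail _ (.tail _ (.tail _ (.tail _ (.tail _ (.tail _ (.tail _ (.head _)))))))) h
      · intro kr hm hlt
        rcases pvKeywords_cases kr hm with rfl|rfl|rfl|rfl|rfl|rfl|rfl|rfl|rfl|rfl|rfl|rfl|rfl|rfl|rfl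
        · exact h1.1
        · exact h1.2
        · exact h2.1
        · exact h2.2
        · exact h3.1
        · exact h3.2
        · exact absurd hlt (by decide)
        · exact absurd hlt (by decide)
        · exact absurd hlt (by decide)
        · exact absurd hlt (by decide)
        · exact absurd hlt (by decide)
        · exact absurd hlt (by decide)
        · exact absurd hlt (by decide)
        · exact absurd hlt (by decide)
        · exact absurd hlt (by decide)
    rw [if_pos h4, hb]
    decide
  rw [if_neg h4]
  simp only [Bool.or_eq_true, not_or, Bool.not_eq_true] at h4
  by_cases h5 : PySem.Chars.isIn "arm".toList L = true
  · have hb : pvBest L = 4 := by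
      apply pvBest_eq L 4 (by decide)
      · exact pvBest_le_of_isIn L ("arm".toList, 4) (by exact .tail _ (.tail _ (.tail _ (.tail _ (.tail _ (.tail _ (.tail _ (.tail _ (.head _))))))))) h5
      · intro kr hm hlt
        rcases pvKeywords_cases kr hm with rfl|rfl|rfl|rfl|rfl|rfl|rfl|rfl|rfl|rfl|rfl|rfl|rfl|rfl|rfl
        · exact h1.1
        · exact h1.2
        · exact h2.1
        · exact h2.2
        · exact h3.1
        · exact h3.2
        · exact h4.1
        · exact h4.2
        · exact absurd hlt (by decide)
        · exact absurd hlt (by decide)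
        · exact absurd hlt (by decide)
        · exact absurd hlt (by decide)
        · exact absurd hlt (by decide)
        · exact absurd hlt (by decide)
        · exact absurd hlt (by decide)
    rw [if_pos h5, hb]
    decide
  rw [if_neg h5]
  rw [Bool.not_eq_true] at h5
  by_cases h6 : PySem.Chars.isIn "eye".toList L = true
  · have hb : pvBest L = 5 := by
      apply pvBest_eq L 5 (by decide)
      · exact pvBest_le_of_isIn L ("eye".toList, 5) (by exact .tail _ (.tail _ (.tail _ (.tail _ (.tail _ (.tail _ (.tail _ (.tail _ (.tail _ (.head _)))))))))) h6
      · intro kr hm hlt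
        rcases pvKeywords_cases kr hm with rfl|rfl|rfl|rfl|rfl|rfl|rfl|rfl|rfl|rfl|rfl|rfl|rfl|rfl|rfl
        · exact h1.1
        · exact h1.2
        · exact h2.1
        · exact h2.2
        · exact h3.1
        · exact h3.2
        · exact h4.1
        · exact h4.2
        · exact h5
        · exact absurd hlt (by decide)
        · exact absurd hlt (by decide)
        · exact absurd hlt (by decide)
        · exact absurd hlt (by decide)
        · exact absurd hlt (by decide)
        · exact absurd hlt (by decide)
    rw [if_pos h6, hb]
    decide
  rw [if_neg h6]
  rw [Bool.not_eq_true] at h6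
  by_cases h7 : PySem.Chars.isIn "mouth".toList L = true
  · have hb : pvBest L = 6 := by
      apply pvBest_eq L 6 (by decide)
      · exact pvBest_le_of_isIn L ("mouth".toList, 6) (by exact .tail _ (.tail _ (.tail _ (.tail _ (.tail _ (.tail _ (.tail _ (.tail _ (.tail _ (.tail _ (.head _))))))))))) h7
      · intro kr hm hlt
        rcases pvKeywords_cases kr hm with rfl|rfl|rfl|rfl|rfl|rfl|rfl|rfl|rfl|rfl|rfl|rfl|rfl|rfl|rfl
        · exact h1.1
        · exact h1.2
        · exact h2.1
        · exact h2.2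
        · exact h3.1
        · exact h3.2
        · exact h4.1
        · exact h4.2
        · exact h5
        · exact h6
        · exact absurd hlt (by decide)
        · exact absurd hlt (by decide)
        · exact absurd hlt (by decide)
        · exact absurd hlt (by decide)
        · exact absurd hlt (by decide)
    rw [if_pos h7, hb]
    decide
  rw [if_neg h7]
  rw [Bool.not_eq_true] at h7
  by_cases h8 : PySem.Chars.isIn "hair".toList L = true
  · have hb : pvBest L = 7 := by
      apply pvBest_eq L 7 (by decide)
      · exact pvBest_le_of_isIn L ("hair".toList, 7) (by exact .tail _ (.tail _ (.tail _ (.tail _ (.tail _ (.tail _ (.tail _ (.tail _ (.tail _ (.tail _ (.tail _ (.head _)))))))))))) h8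
      · intro kr hm hlt
        rcases pvKeywords_cases kr hm with rfl|rfl|rfl|rfl|rfl|rfl|rfl|rfl|rfl|rfl|rfl|rfl|rfl|rfl|rfl
        · exact h1.1
        · exact h1.2
        · exact h2.1
        · exact h2.2
        · exact h3.1
        · exact h3.2
        · exact h4.1
        · exact h4.2
        · exact h5
        · exact h6
        · exact h7
        · exact absurd hlt (by decide)
        · exact absurd hlt (by decide)
        · exact absurd hlt (by decide)
        · exact absurd hlt (by decide)
    rw [if_pos h8, hb]
    decide
  rw [if_neg h8]
  rw [Bool.not_eq_true] at h8
  by_cases h9 : (PySem.Chars.isIn "blend".toList L || (PySem.Chars.isIn "effect".toList L || PySem.Chars.isIn "shadow".toList L)) = true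
  · have hb : pvBest L = 8 := by
      apply pvBest_eq L 8 (by decide)
      · rcases (Bool.or_eq_true _ _) ▸ h9 with h | h'
        · exact pvBest_le_of_isIn L ("blend".toList, 8) (by exact .tail _ (.tail _ (.tail _ (.tail _ (.tail _ (.tail _ (.tail _ (.tail _ (.tail _ (.tail _ (.tail _ (.tail _ (.head _))))))))))))) h
        · rcases (Bool.or_eq_true _ _) ▸ h' with h | h
          · exact pvBest_le_of_isIn L ("effect".toList, 8) (by exact .tail _ (.tail _ (.tail _ (.tail _ (.tail _ (.tail _ (.tail _ (.tail _ (.tail _ (.tail _ (.tail _ (.tail _ (.tail _ (.head _)))))))))))))) h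
          · exact pvBest_le_of_isIn L ("shadow".toList, 8) (by exact .tail _ (.tail _ (.tail _ (.tail _ (.tail _ (.tail _ (.tail _ (.tail _ (.tail _ (.tail _ (.tail _ (.tail _ (.tail _ (.tail _ (.head _))))))))))))))) h
      · intro kr hm hlt
        rcases pvKeywords_cases kr hm with rfl|rfl|rfl|rfl|rfl|rfl|rfl|rfl|rfl|rfl|rfl|rfl|rfl|rfl|rfl
        · exact h1.1
        · exact h1.2
        · exact h2.1
        · exact h2.2
        · exact h3.1
        · exact h3.2
        · exact h4.1
        · exact h4.2
        · exact h5
        · exact h6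
        · exact h7
        · exact h8
        · exact absurd hlt (by decide)
        · exact absurd hlt (by decide)
        · exact absurd hlt (by decide)
    rw [if_pos h9, hb]
    decide
  rw [if_neg h9]
  simp only [Bool.or_eq_true, not_or, Bool.not_eq_true] at h9
  have hb : pvBest L = 9 := by
    apply pvBest_eq_nine
    intro kr hm
    rcases pvKeywords_cases kr hm with rfl|rfl|rfl|rfl|rfl|rfl|rfl|rfl|rfl|rfl|rfl|rfl|rfl|rfl|rfl
    · exact h1.1
    · exact h1.2
    · exact h2.1
    · exact h2.2
    · exact h3.1
    · exact h3.2
    · exact h4.1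
    · exact h4.2
    · exact h5
    · exact h6
    · exact h7
    · exact h8
    · exact h9.1
    · exact h9.2.1
    · exact h9.2.2
  rw [hb]
  decide
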